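-- pv_equiv track=rewrite | github.com/wintiger98/algorithm | programmers/카카오 인턴십/행렬과 연산.py | solution
-- ===== SOURCE A (Python) =====
-- from collections import deque
--
-- def solution(rc, operations):
--     rc = deque([deque(r) for r in rc])
--     firsts = deque()
--     lasts = deque()
--
--     for r in rc:
--         firsts.append(r.popleft())
--         lasts.append(r.pop())
--
--     for operation in operations:
--         if operation == "ShiftRow":
--             rc.appendleft(rc.pop())
--             firsts.appendleft(firsts.pop())
--             lasts.appendleft(lasts.pop())
--         else:
--             rc[0].appendleft(firsts.popleft())
--             lasts.appendleft(rc[0].pop())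
--             rc[-1].append(lasts.pop())
--             firsts.append(rc[-1].popleft())
--
--     for r in rc:
--         r.appendleft(firsts.popleft())
--         r.append(lasts.popleft())
--
--     return [list(r) for r in rc]
-- ===== SOURCE B (Python) =====
-- def rotate_border(mat):
--     # clockwise rotation of the border ring by one: every row is rebuilt from its neighbours
--     n = len(mat)
--     new = [[mat[1][0]] + mat[0][:-1]]
--     for i in range(1, n - 1):
--         new.append([mat[i + 1][0]] + mat[i][1:-1] + [mat[i - 1][-1]])
--     new.append(mat[n - 1][1:] + [mat[n - 2][-1]])
--     return new
--
--
-- def solution(rc, operations):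
--     mat = [list(r) for r in rc]
--     for op in operations:
--         if op == "ShiftRow":
--             mat = [mat[-1]] + mat[:-1]
--         else:
--             mat = rotate_border(mat)
--     return mat
-- ===== Notes on version B (the rewrite author's own statement) =====
-- stated objective: simpler
-- what changed: B keeps the whole matrix as a list of rows and rebuilds each affected row directly (ShiftRow = rotate the row list; Rotate = recompute the border rows from their neighbours), instead of A's three synchronized deques (first column, last column, inner rows) with popleft/pop/append bookkeeping.
-- outside the precondition, e.g. on solution([[1, 2, 3]], ['Rotate']): A returns [[1, 3, 2]], B raises IndexError
import Mathlib
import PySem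

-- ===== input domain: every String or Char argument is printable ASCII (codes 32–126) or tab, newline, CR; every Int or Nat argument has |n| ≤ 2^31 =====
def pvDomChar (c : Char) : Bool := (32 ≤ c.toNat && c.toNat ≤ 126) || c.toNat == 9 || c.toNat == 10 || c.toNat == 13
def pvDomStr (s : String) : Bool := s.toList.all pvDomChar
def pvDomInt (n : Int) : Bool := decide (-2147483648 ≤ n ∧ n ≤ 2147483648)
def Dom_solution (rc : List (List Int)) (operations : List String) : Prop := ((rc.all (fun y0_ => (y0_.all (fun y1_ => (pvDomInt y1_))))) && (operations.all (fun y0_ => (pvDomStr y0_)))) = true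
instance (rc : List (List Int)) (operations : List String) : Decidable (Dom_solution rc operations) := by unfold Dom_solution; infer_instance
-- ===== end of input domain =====

-- B replaces A's three synchronized deques (first column, last column, inner rows) by the
-- whole matrix as a list of rows, rebuilding the affected rows directly on each operation.
-- Equivalence is about the return value; neither program mutates its arguments observably.

-- B replaces A's three synchronized deques (first column, last column, inner rows) by the
-- whole matrix kept as a list of rows, rebuilding the affected rows directly on each
-- operation; equivalence is about the return value (neither side observably mutates rc).

-- ===== PORT A =====
-- deque.popleft / deque.pop modelled on lists; the defaults are only reached where Python raises
def pyPopLeft (l : List Int) : Int × List Int := (l.headD 0, l.tail)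
def pyPop (l : List Int) : Int × List Int := (l.getLastD 0, l.dropLast)

-- first loop: strip each row's first and last element into `firsts` / `lasts`
def solInit (rc : List (List Int)) : List (List Int) × List Int × List Int :=
  rc.foldl (fun st r =>
    let (f, r1) := pyPopLeft r
    let (l, r2) := pyPop r1
    (st.1 ++ [r2], st.2.1 ++ [f], st.2.2 ++ [l])) ([], [], [])

-- one operation on A's state (inner rows, firsts, lasts)
def solStep (st : List (List Int) × List Int × List Int) (op : String) :
    List (List Int) × List Int × List Int :=
  let (rows, firsts, lasts) := st
  if op == "ShiftRow" then
    (rows.getLastD [] :: rows.dropLast, firsts.getLastD 0 :: firsts.dropLast,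
     lasts.getLastD 0 :: lasts.dropLast)
  else
    let (f, firsts1) := pyPopLeft firsts
    let row0 := f :: rows.headD []
    let (x, row0') := pyPop row0
    let lasts1 := x :: lasts
    let rows1 := row0' :: rows.tail
    let (lend, lasts2) := pyPop lasts1
    let rowL := rows1.getLastD [] ++ [lend]
    let (y, rowL2) := pyPopLeft rowL
    (rows1.dropLast ++ [rowL2], firsts1 ++ [y], lasts2)

-- last loop: glue firsts/lasts back onto the rows
def solFin (st : List (List Int) × List Int × List Int) : List (List Int) :=
  (st.1.foldl (fun (acc : List (List Int) × List Int × List Int) r =>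
      (acc.1 ++ [acc.2.1.headD 0 :: r ++ [acc.2.2.headD 0]], acc.2.1.tail, acc.2.2.tail))
    ([], st.2.1, st.2.2)).1

def solution (rc : List (List Int)) (operations : List String) : List (List Int) :=
  solFin (operations.foldl solStep (solInit rc))

-- ===== PORT B =====
-- Source B rotate_border: rebuild every row of the matrix for a clockwise border rotation
-- (pyGetD defaults are only reached where Python raises; unreachable under Pre_)
def rotateBorder (mat : List (List Int)) : List (List Int) :=
  let n : Int := mat.length
  let new0 : List Int :=
    PySem.List.pyGetD (PySem.List.pyGetD mat 1 []) 0 0 :: (PySem.List.pyGetD mat 0 []).dropLast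
  let mid := (PySem.List.pyRange 1 (n - 1) 1).foldl
    (fun acc i => acc ++
      [PySem.List.pyGetD (PySem.List.pyGetD mat (i + 1) []) 0 0 ::
        ((PySem.List.pyGetD mat i []).tail.dropLast ++
          [PySem.List.pyGetD (PySem.List.pyGetD mat (i - 1) []) (-1) 0])]) [new0]
  mid ++ [(PySem.List.pyGetD mat (n - 1) []).tail ++
    [PySem.List.pyGetD (PySem.List.pyGetD mat (n - 2) []) (-1) 0]]

-- one operation of Source B's loop on the whole matrix
def stepB (mat : List (List Int)) (op : String) : List (List Int) :=
  if op == "ShiftRow" then PySem.List.pyGetD mat (-1) [] :: mat.dropLast else rotateBorder mat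

def solution_alt (rc : List (List Int)) (operations : List String) : List (List Int) :=
  operations.foldl stepB rc

-- ===== PRECONDITION & SPEC =====
-- Pre_ excludes: rows shorter than 2 and nonempty operations on an empty matrix (A raises
-- IndexError on both), and single-row matrices with a non-"ShiftRow" operation, where A's
-- deque aliasing returns an accidental swap of the last two entries while B raises.
def Pre_solution (rc : List (List Int)) (operations : List String) : Prop :=
  (∀ r ∈ rc, 2 ≤ r.length) ∧ (operations ≠ [] → rc ≠ []) ∧
  ((∃ op ∈ operations, op ≠ "ShiftRow") → 2 ≤ rc.length)
instance (rc : List (List Int)) (operations : List String) : Decidable (Pre_solution rc operations) := by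
  unfold Pre_solution; infer_instance

def pvWitness_solution : List (List Int) × List String :=
  ([[1, 2, 3], [4, 5, 6], [7, 8, 9]], ["Rotate", "ShiftRow", "Rotate"])

def Spec_solution (rc : List (List Int)) (operations : List String) (out : List (List Int)) : Prop := out = solution_alt rc operations
instance (rc : List (List Int)) (operations : List String) (out : List (List Int)) : Decidable (Spec_solution rc operations out) := by unfold Spec_solution; infer_instance

-- ===== CLAIM (what is proved, stated in full; the proofs are below) =====
def Claim_equal_solution : Prop := ∀ (rc : List (List Int)) (operations : List String), Dom_solution rc operations → Pre_solution rc operations → Spec_solution rc operations (solution rc operations)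

-- ===== LEMMAS AND PROOFS =====

-- the three column/middle projections of a matrix (A's deque state as a function of B's matrix)
def fcol (mat : List (List Int)) : List Int := mat.map (fun r => r.headD 0)
def lcol (mat : List (List Int)) : List Int := mat.map (fun r => r.getLastD 0)
def mids (mat : List (List Int)) : List (List Int) := mat.map (fun r => r.tail.dropLast)

-- B's border rotation, restated as structural recursion down the rows (proof-side spec)
def rotateRest (above : List Int) (rows : List (List Int)) : List (List Int) :=
  match rows with
  | [] => []
  | [r] => [r.tail ++ [above.getLastD 0]]
  | r0 :: r1 :: rs =>
      (r1.headD 0 :: (r0.tail.dropLast ++ [above.getLastD 0])) :: rotateRest r0 (r1 :: rs)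

lemma pyGetD_neg_one_getLastD {α : Type} (l : List α) (d : α) :
    PySem.List.pyGetD l (-1) d = l.getLastD d := by
  cases l with
  | nil => simp [PySem.List.pyGetD, PySem.List.pyGet?, PySem.List.pyIdx?]
  | cons x xs =>
    rw [PySem.List.pyGetD_neg_one _ _ (by simp)]
    simp [List.getLastD_eq_getLast?, List.getLast?_eq_some_getLast (l := x :: xs) (by simp)]

lemma getD_zero_headD (l : List Int) : l.getD 0 0 = l.headD 0 := by
  cases l <;> simp

lemma getD_of_drop (mat : List (List Int)) (i : Nat) (r : List Int) (us : List (List Int))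
    (h : mat.drop i = r :: us) : mat.getD i [] = r := by
  have h2 : mat[i]? = some r := by
    have h3 : (mat.drop i)[0]? = mat[i + 0]? := List.getElem?_drop ..
    simp [h] at h3
    exact h3.symm
  simp [List.getD_eq_getElem?_getD, h2]

lemma rotateRest_aux (mat : List (List Int)) (us : List (List Int)) : ∀ (r : List Int) (i : Nat),
    1 ≤ i → mat.drop i = r :: us →
    (PySem.List.pyRange (i : Int) ((mat.length : Int) - 1) 1).map
        (fun j => PySem.List.pyGetD (PySem.List.pyGetD mat (j + 1) []) 0 0 ::
          ((PySem.List.pyGetD mat j []).tail.dropLast ++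
            [PySem.List.pyGetD (PySem.List.pyGetD mat (j - 1) []) (-1) 0]))
      ++ [(PySem.List.pyGetD mat ((mat.length : Int) - 1) []).tail ++
        [PySem.List.pyGetD (PySem.List.pyGetD mat ((mat.length : Int) - 2) []) (-1) 0]]
    = rotateRest (mat.getD (i - 1) []) (r :: us) := by
  induction us with
  | nil =>
    intro r i hi hdrop
    have hlen : mat.length = i + 1 := by
      have := congrArg List.length hdrop
      simp at this
      omega
    rw [PySem.List.pyRange_one_eq_nil (by omega)]
    have e1 : ((mat.length : Int) - 1) = ((i : Nat) : Int) := by omega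
    have e2 : ((mat.length : Int) - 2) = (((i - 1 : Nat)) : Int) := by omega
    rw [e1, e2, PySem.List.pyGetD_natCast, PySem.List.pyGetD_natCast,
      getD_of_drop mat i r [] hdrop, pyGetD_neg_one_getLastD]
    simp [rotateRest]
  | cons s ss ih =>
    intro r i hi hdrop
    have hlen : mat.length = i + 2 + ss.length := by
      have := congrArg List.length hdrop
      simp at this
      omega
    have hdrop' : mat.drop (i + 1) = s :: ss := by
      have : mat.drop (i + 1) = (mat.drop i).drop 1 := by
        rw [List.drop_drop]
      rw [this, hdrop]
      simp
    rw [PySem.List.pyRange_one_cons (by omega), List.map_cons]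
    have e1 : ((i : Int) + 1) = (((i + 1 : Nat)) : Int) := by omega
    have e2 : ((i : Int) - 1) = (((i - 1 : Nat)) : Int) := by omega
    rw [List.cons_append, e1, e2, PySem.List.pyGetD_natCast, PySem.List.pyGetD_natCast,
      PySem.List.pyGetD_natCast, getD_of_drop mat i r (s :: ss) hdrop,
      getD_of_drop mat (i + 1) s ss hdrop', pyGetD_neg_one_getLastD,
      ih s (i + 1) (by omega) hdrop']
    simp [rotateRest, PySem.List.pyGetD_zero, getD_zero_headD]
    constructor
    · cases s <;> simp
    · have hr := getD_of_drop mat i r (s :: ss) hdrop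
      simp [List.getD_eq_getElem?_getD] at hr
      rw [hr]

lemma rotateBorder_spec (a u : List Int) (us : List (List Int)) :
    rotateBorder (a :: u :: us) = (u.headD 0 :: a.dropLast) :: rotateRest a (u :: us) := by
  unfold rotateBorder
  dsimp only
  rw [PySem.List.foldl_append_singleton_eq_map]
  have haux := rotateRest_aux (a :: u :: us) us u 1 (le_refl 1) (by simp)
  norm_num at haux ⊢
  rw [haux, PySem.List.pyGetD_zero, getD_zero_headD]
  simp [pysem]

lemma tail_getLastD (r : List Int) (h : 2 ≤ r.length) :
    r.tail.getLastD 0 = r.getLastD 0 := by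
  cases r with
  | nil => simp at h
  | cons x xs =>
    cases xs with
    | nil => simp at h
    | cons y ys => simp [List.getLastD_cons]

lemma solInit_go (rc : List (List Int)) (h : ∀ r ∈ rc, 2 ≤ r.length) :
    ∀ acc : List (List Int) × List Int × List Int,
    rc.foldl (fun st r =>
      let (f, r1) := pyPopLeft r
      let (l, r2) := pyPop r1
      (st.1 ++ [r2], st.2.1 ++ [f], st.2.2 ++ [l])) acc =
      (acc.1 ++ mids rc, acc.2.1 ++ fcol rc, acc.2.2 ++ lcol rc) := by
  induction rc with
  | nil => intro acc; simp [mids, fcol, lcol]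
  | cons r rs ih =>
    intro acc
    simp only [List.foldl_cons]
    rw [ih (fun x hx => h x (by simp [hx]))]
    have := tail_getLastD r (h r (by simp))
    simp only [List.getLastD_eq_getLast?] at this
    simp [pyPopLeft, pyPop, mids, fcol, lcol, this]

lemma solInit_eq (rc : List (List Int)) (h : ∀ r ∈ rc, 2 ≤ r.length) :
    solInit rc = (mids rc, fcol rc, lcol rc) := by
  unfold solInit
  rw [solInit_go rc h ([], [], [])]
  simp

lemma dropLast_concat_getLastD (l : List Int) (h : l ≠ []) :
    l.dropLast ++ [l.getLast?.getD 0] = l := by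
  induction l with
  | nil => simp at h
  | cons x xs ih =>
    cases xs with
    | nil => simp
    | cons y ys => simpa using congrArg (x :: ·) (ih (by simp))

lemma reassemble (r : List Int) (h : 2 ≤ r.length) :
    r.headD 0 :: (r.tail.dropLast ++ [r.getLastD 0]) = r := by
  cases r with
  | nil => simp at h
  | cons x xs =>
    cases xs with
    | nil => simp at h
    | cons y ys =>
      simp only [List.headD_cons, List.tail_cons, List.getLastD_eq_getLast?,
        List.getLast?_cons_cons]
      rw [dropLast_concat_getLastD (y :: ys) (by simp)]

lemma solFin_go (mat : List (List Int)) (h : ∀ r ∈ mat, 2 ≤ r.length) :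
    ∀ (A : List (List Int)) (F L : List Int),
    (mids mat).foldl (fun (acc : List (List Int) × List Int × List Int) r =>
      (acc.1 ++ [acc.2.1.headD 0 :: r ++ [acc.2.2.headD 0]], acc.2.1.tail, acc.2.2.tail))
      (A, fcol mat ++ F, lcol mat ++ L) = (A ++ mat, F, L) := by
  induction mat with
  | nil => intro A F L; simp [mids, fcol, lcol]
  | cons r rs ih =>
    intro A F L
    simp only [mids, fcol, lcol, List.map_cons, List.foldl_cons, List.cons_append,
      List.headD_cons, List.tail_cons]
    have hr := reassemble r (h r (by simp))
    rw [hr]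
    have := ih (fun x hx => h x (by simp [hx])) (A ++ [r]) F L
    simp only [mids, fcol, lcol] at this
    rw [show A ++ r :: rs = A ++ [r] ++ rs by simp]
    exact this

lemma solFin_split (mat : List (List Int)) (h : ∀ r ∈ mat, 2 ≤ r.length) :
    solFin (mids mat, fcol mat, lcol mat) = mat := by
  have h2 := solFin_go mat h [] [] []
  simp only [List.append_nil] at h2
  unfold solFin
  show (List.foldl _ ([], fcol mat, lcol mat) (mids mat)).1 = mat
  rw [h2]
  simp

lemma getLastD_mem {α : Type} (l : List α) (d : α) (h : l ≠ []) : l.getLastD d ∈ l := by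
  induction l with
  | nil => simp at h
  | cons x xs ih =>
    cases xs with
    | nil => simp
    | cons y ys => simp only [List.getLastD_eq_getLast?, List.getLast?_cons_cons]
                   have := ih (by simp)
                   simp only [List.getLastD_eq_getLast?] at this
                   simp [this]

lemma getLastD_cons_ne {α : Type} (c d : α) (s : List α) (h : s ≠ []) :
    (c :: s).getLastD d = s.getLastD d := by
  cases s with
  | nil => simp at h
  | cons y ys => simp [List.getLastD_eq_getLast?, List.getLast?_cons_cons]

lemma getLastD_map_cols (mat : List (List Int)) (f : List Int → Int) (h : mat ≠ []) :
    (mat.map f).getLastD 0 = f (mat.getLastD []) := by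
  cases hm : mat.getLast? with
  | none => exact absurd (List.getLast?_eq_none_iff.mp hm) h
  | some a => simp [List.getLastD_eq_getLast?, List.getLast?_map, hm]

lemma getLastD_map_mids (mat : List (List Int)) (h : mat ≠ []) :
    (mids mat).getLastD [] = (mat.getLastD []).tail.dropLast := by
  cases hm : mat.getLast? with
  | none => exact absurd (List.getLast?_eq_none_iff.mp hm) h
  | some a => simp [mids, List.getLastD_eq_getLast?, List.getLast?_map, hm]

lemma tail_reassemble (r : List Int) (h : 2 ≤ r.length) :
    r.tail.dropLast ++ [r.getLastD 0] = r.tail := by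
  rw [← tail_getLastD r h, List.getLastD_eq_getLast?]
  apply dropLast_concat_getLastD
  cases r with
  | nil => simp at h
  | cons x xs => cases xs with
    | nil => simp at h
    | cons y ys => simp

lemma headD_cons_dropLast (a : List Int) (h : 2 ≤ a.length) :
    a.headD 0 :: a.tail.dropLast = a.dropLast := by
  cases a with
  | nil => simp at h
  | cons x xs => cases xs with
    | nil => simp at h
    | cons y ys => simp

lemma rotateRest_fcol (rs : List (List Int)) : ∀ (above r : List Int), 2 ≤ r.length →
    (∀ s ∈ rs, 2 ≤ s.length) →
    fcol (rotateRest above (r :: rs)) = fcol rs ++ [((r :: rs).getLastD []).tail.headD 0] := by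
  induction rs with
  | nil =>
    intro above r hr _
    cases r with
    | nil => simp at hr
    | cons x xs => cases xs with
      | nil => simp at hr
      | cons y ys => simp [rotateRest, fcol]
  | cons u us ih =>
    intro above r hr hall
    simp only [rotateRest, fcol, List.map_cons]
    rw [show List.map (fun r => r.headD 0) (rotateRest r (u :: us)) =
        fcol (rotateRest r (u :: us)) from rfl,
      ih r u (hall u (by simp)) (fun s hs => hall s (by simp [hs]))]
    simp [fcol, getLastD_cons_ne _ _ (u :: us) (by simp)]

lemma concat_getLastD (xs : List Int) (v : Int) : (xs ++ [v]).getLastD 0 = v := by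
  simp [List.getLastD_eq_getLast?]

lemma rotateRest_lcol (rs : List (List Int)) : ∀ (above r : List Int),
    lcol (rotateRest above (r :: rs)) = above.getLastD 0 :: lcol ((r :: rs).dropLast) := by
  induction rs with
  | nil => intro above r; simp [rotateRest, lcol, List.getLastD_eq_getLast?]
  | cons u us ih =>
    intro above r
    simp only [rotateRest, lcol, List.map_cons]
    rw [show List.map (fun r => r.getLastD 0) (rotateRest r (u :: us)) =
        lcol (rotateRest r (u :: us)) from rfl, ih r u]
    rw [getLastD_cons_ne _ _ _ (by simp), concat_getLastD]
    simp [lcol]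

lemma rotateRest_mids (rs : List (List Int)) : ∀ (above r : List Int), 2 ≤ r.length →
    (∀ s ∈ rs, 2 ≤ s.length) →
    mids (rotateRest above (r :: rs)) =
      mids ((r :: rs).dropLast) ++ [((r :: rs).getLastD []).tail.tail] := by
  induction rs with
  | nil =>
    intro above r hr _
    cases r with
    | nil => simp at hr
    | cons x xs => cases xs with
      | nil => simp at hr
      | cons y ys => simp [rotateRest, mids]
  | cons u us ih =>
    intro above r hr hall
    simp only [rotateRest, mids, List.map_cons]
    rw [show List.map (fun r => r.tail.dropLast) (rotateRest r (u :: us)) =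
        mids (rotateRest r (u :: us)) from rfl,
      ih r u (hall u (by simp)) (fun s hs => hall s (by simp [hs]))]
    simp [mids, getLastD_cons_ne _ _ (u :: us) (by simp)]

lemma rotateRest_rows (rs : List (List Int)) : ∀ (above r : List Int), 2 ≤ r.length →
    (∀ s ∈ rs, 2 ≤ s.length) →
    ∀ s ∈ rotateRest above (r :: rs), 2 ≤ s.length := by
  induction rs with
  | nil =>
    intro above r hr _ s hs
    simp only [rotateRest, List.mem_singleton] at hs
    subst hs
    simp
    cases r with
    | nil => simp at hr
    | cons x xs => cases xs with
      | nil => simp at hr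
      | cons y ys => simp
  | cons u us ih =>
    intro above r hr hall s hs
    simp only [rotateRest, List.mem_cons] at hs
    rcases hs with h1 | h2
    · subst h1; simp
    · exact ih r u (hall u (by simp)) (fun x hx => hall x (by simp [hx])) s h2

lemma rotateRest_length (rs : List (List Int)) : ∀ (above r : List Int),
    (rotateRest above (r :: rs)).length = rs.length + 1 := by
  induction rs with
  | nil => intro above r; simp [rotateRest]
  | cons u us ih => intro above r; simp [rotateRest, ih r u]

lemma stepB_length (mat : List (List Int)) (op : String) (h : mat ≠ [])
    (h2 : op ≠ "ShiftRow" → 2 ≤ mat.length) :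
    (stepB mat op).length = mat.length := by
  unfold stepB
  split
  · cases mat with
    | nil => simp at h
    | cons a t => simp
  · next hop =>
    obtain ⟨a, u, us, hm⟩ : ∃ a u us, mat = a :: u :: us := by
      have := h2 (by intro hc; subst hc; simp at hop)
      cases mat with
      | nil => simp at this
      | cons a t => cases t with
        | nil => simp at this
        | cons u us => exact ⟨a, u, us, rfl⟩
    subst hm
    rw [rotateBorder_spec]
    simp [rotateRest_length]

lemma stepB_rows (mat : List (List Int)) (op : String) (h : ∀ r ∈ mat, 2 ≤ r.length)
    (hne : mat ≠ []) (h2 : op ≠ "ShiftRow" → 2 ≤ mat.length) :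
    ∀ r ∈ stepB mat op, 2 ≤ r.length := by
  unfold stepB
  split
  · intro r hr
    rcases List.mem_cons.mp hr with h1 | h2
    · subst h1
      rw [pyGetD_neg_one_getLastD]
      exact h _ (getLastD_mem mat [] hne)
    · exact h _ (List.dropLast_subset _ h2)
  · next hop =>
    obtain ⟨a, u, us, hm⟩ : ∃ a u us, mat = a :: u :: us := by
      have := h2 (by intro hc; subst hc; simp at hop)
      cases mat with
      | nil => simp at this
      | cons a t => cases t with
        | nil => simp at this
        | cons u us => exact ⟨a, u, us, rfl⟩
    subst hm
    rw [rotateBorder_spec]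
    have ha := h a (by simp)
    intro r hr
    rcases List.mem_cons.mp hr with h1 | h2'
    · subst h1
      simp only [List.length_cons, List.length_dropLast]
      omega
    · exact rotateRest_rows us a u (h u (by simp)) (fun s hs => h s (by simp [hs])) r h2'

lemma step_comm (mat : List (List Int)) (op : String)
    (h : ∀ r ∈ mat, 2 ≤ r.length) (hne : mat ≠ [])
    (h2 : op ≠ "ShiftRow" → 2 ≤ mat.length) :
    solStep (mids mat, fcol mat, lcol mat) op =
      (mids (stepB mat op), fcol (stepB mat op), lcol (stepB mat op)) := by
  by_cases hop : op = "ShiftRow"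
  · subst hop
    simp only [solStep, stepB, beq_self_eq_true, if_true, pyGetD_neg_one_getLastD]
    cases mat with
    | nil => simp at hne
    | cons a t =>
      have hm : (a :: t) ≠ [] := by simp
      have h1 := getLastD_map_cols (a :: t) (fun r => r.headD 0) hm
      have h2' := getLastD_map_cols (a :: t) (fun r => r.getLastD 0) hm
      have h3 := getLastD_map_mids (a :: t) hm
      simp only [fcol, lcol, mids] at *
      rw [h1, h2', h3]
      simp [List.map_dropLast]
  · have hbeq : (op == "ShiftRow") = false := by simp [hop]
    obtain ⟨a, t', hmat⟩ : ∃ a t', mat = a :: t' := by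
      cases mat with
      | nil => simp at hne
      | cons a t => exact ⟨a, t, rfl⟩
    subst hmat
    have ht : t' ≠ [] := by
      have := h2 hop; cases t' with
      | nil => simp at this
      | cons u us => simp
    obtain ⟨u, us, hteq⟩ : ∃ u us, t' = u :: us := by
      cases t' with
      | nil => simp at ht
      | cons u us => exact ⟨u, us, rfl⟩
    subst hteq
    have ha := h a (by simp)
    have hu := h u (by simp)
    have htL2 : 2 ≤ ((u :: us).getLastD []).length :=
      h _ (by exact List.mem_cons_of_mem a (getLastD_mem (u :: us) [] (by simp)))
    simp only [solStep, stepB, hbeq, if_false, Bool.false_eq_true]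
    rw [rotateBorder_spec]
    simp only [pyPopLeft, pyPop, fcol, lcol, mids, List.map_cons, List.headD_cons,
      List.tail_cons]
    rw [headD_cons_dropLast a ha]
    have hadl : a.dropLast ≠ [] := by
      cases a with
      | nil => simp at ha
      | cons x xs => cases xs with
        | nil => simp at ha
        | cons y ys => simp
    have hX : ((a.dropLast.dropLast :: u.tail.dropLast ::
          List.map (fun r => r.tail.dropLast) us).getLastD [])
        = ((u :: us).getLastD []).tail.dropLast := by
      rw [getLastD_cons_ne _ _ _ (by simp)]
      have := getLastD_map_mids (u :: us) (by simp)
      simpa [mids] using this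
    have hY : ((a.dropLast.getLastD 0 :: a.getLastD 0 :: u.getLastD 0 ::
          List.map (fun r => r.getLastD 0) us).getLastD 0)
        = ((u :: us).getLastD []).getLastD 0 := by
      rw [getLastD_cons_ne _ _ _ (by simp), getLastD_cons_ne _ _ _ (by simp)]
      have := getLastD_map_cols (u :: us) (fun r => r.getLastD 0) (by simp)
      simpa using this
    rw [hX, hY, tail_reassemble _ htL2]
    have hf := rotateRest_fcol us a u hu (fun s hs => h s (by simp [hs]))
    have hl := rotateRest_lcol us a u
    have hm := rotateRest_mids us a u hu (fun s hs => h s (by simp [hs]))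
    simp only [fcol, lcol, mids] at hf hl hm
    rw [hf, hl, hm, getLastD_cons_ne (u.headD 0) 0 a.dropLast hadl]
    simp [List.map_dropLast]

lemma loop_comm (ops : List String) : ∀ (mat : List (List Int)),
    (∀ r ∈ mat, 2 ≤ r.length) → (ops ≠ [] → mat ≠ []) →
    ((∃ op ∈ ops, op ≠ "ShiftRow") → 2 ≤ mat.length) →
    ops.foldl solStep (mids mat, fcol mat, lcol mat) =
      (mids (ops.foldl stepB mat), fcol (ops.foldl stepB mat), lcol (ops.foldl stepB mat)) ∧
    (∀ r ∈ ops.foldl stepB mat, 2 ≤ r.length) := by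
  induction ops with
  | nil => intro mat h _ _; exact ⟨rfl, h⟩
  | cons op rest ih =>
    intro mat h hne h2
    have hmne : mat ≠ [] := hne (by simp)
    have hmat2 : op ≠ "ShiftRow" → 2 ≤ mat.length := fun hop => h2 ⟨op, by simp, hop⟩
    have hlen := stepB_length mat op hmne hmat2
    have hrows := stepB_rows mat op h hmne hmat2
    have hne' : rest ≠ [] → stepB mat op ≠ [] := by
      intro _
      intro hc
      rw [hc] at hlen
      simp at hlen
      exact hmne (List.length_eq_zero_iff.mp hlen.symm)
    have h2' : (∃ o ∈ rest, o ≠ "ShiftRow") → 2 ≤ (stepB mat op).length := by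
      intro ⟨o, ho, hos⟩
      rw [hlen]
      exact h2 ⟨o, by simp [ho], hos⟩
    simp only [List.foldl_cons]
    rw [step_comm mat op h hmne hmat2]
    exact ih (stepB mat op) hrows hne' h2'

-- ===== VERDICT (by name: the statement is the Claim_ definition above) =====
theorem solution_spec : Claim_equal_solution := by
  intro rc operations _ hpre
  obtain ⟨h, hne, h2⟩ := hpre
  unfold Spec_solution solution solution_alt
  obtain ⟨hc, hr⟩ := loop_comm operations rc h hne h2
  rw [solInit_eq rc h, hc, solFin_split _ hr]
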